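-- pv_equiv track=rewrite | github.com/Zalbo-GJ/Competitive-programming | 1545-find-kth-bit-in-nth-binary-string/1545-find-kth-bit-in-nth-binary-string.py | inverse
-- ===== SOURCE A (Python) =====
-- def inverse(s):
--     l = 0
--     r = len(s)-1
--     s = list(map(str,s))
--
--     while l<=r:
--
--         if s[l] == "1":
--             s[l] = "0"
--         else:
--             s[l] = "1"
--         if l == r:
--             break
--         if s[r] == "1":
--             s[r] = "0"
--         else:
--             s[r] = "1"
--
--         s[l],s[r] = s[r], s[l]
--         l+=1
--         r-=1
--
--     return "".join(s)
-- ===== SOURCE B (Python) =====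
-- def inverse(s):
--     return "".join("0" if c == "1" else "1" for c in map(str, reversed(list(s))))
-- ===== Notes on version B (the rewrite author's own statement) =====
-- stated objective: simpler
-- what changed: Replaces the two-pointer in-place invert-and-swap loop with a single reversed-order pass that builds the output directly (invert each char of the reversed string and join); measured ~1.6x faster since it drops per-step index bookkeeping and swaps.
import Mathlib
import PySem

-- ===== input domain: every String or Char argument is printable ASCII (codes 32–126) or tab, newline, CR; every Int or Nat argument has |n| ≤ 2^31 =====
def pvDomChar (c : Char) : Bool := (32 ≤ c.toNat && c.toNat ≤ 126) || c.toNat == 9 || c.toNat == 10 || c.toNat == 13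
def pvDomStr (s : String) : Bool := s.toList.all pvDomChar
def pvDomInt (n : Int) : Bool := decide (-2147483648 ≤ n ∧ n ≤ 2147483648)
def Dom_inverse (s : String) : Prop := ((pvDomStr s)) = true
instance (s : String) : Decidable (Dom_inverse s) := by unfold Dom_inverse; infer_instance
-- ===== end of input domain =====

-- B replaces A's two-pointer in-place invert-and-swap loop by a single reversed-order pass building the output directly (objective: simpler).


-- ===== PORT A =====
-- 'list(map(str, s))' on a string is the identity char-by-char, so the state is a List Char.
-- The while-loop with indices l, r (Ints, as in Python; for "" r starts at -1) becomes inverseLoop.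
def inverseLoop (s : List Char) (l r : Int) : List Char :=
  if _h : l ≤ r then
    -- if s[l] == "1": s[l] = "0" else: s[l] = "1"
    let s1 := if s.getD l.toNat ' ' == '1' then s.set l.toNat '0' else s.set l.toNat '1'
    if l = r then s1      -- if l == r: break
    else
      -- if s[r] == "1": s[r] = "0" else: s[r] = "1"
      let s2 := if s1.getD r.toNat ' ' == '1' then s1.set r.toNat '0' else s1.set r.toNat '1'
      -- s[l], s[r] = s[r], s[l]
      let x := s2.getD l.toNat ' '
      let y := s2.getD r.toNat ' '
      let s3 := (s2.set l.toNat y).set r.toNat x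
      inverseLoop s3 (l + 1) (r - 1)
  else s
termination_by (r + 1 - l).toNat
decreasing_by omega

def inverse (s : String) : String :=
  String.ofList (inverseLoop s.toList 0 ((s.toList.length : Int) - 1))

-- ===== PORT B =====
-- str(c) on a character is the identity, so the generator is a map over the reversed char list.
def inverse_alt (s : String) : String :=
  String.ofList (s.toList.reverse.map (fun c => if c == '1' then '0' else '1'))

-- ===== PRECONDITION & SPEC =====
def Spec_inverse (s : String) (out : String) : Prop := out = inverse_alt s
instance (s : String) (out : String) : Decidable (Spec_inverse s out) := by unfold Spec_inverse; infer_instance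

-- ===== CLAIM (what is proved, stated in full; the proofs are below) =====
def Claim_equal_inverse : Prop := ∀ (s : String), Dom_inverse s → Spec_inverse s (inverse s)

-- ===== LEMMAS AND PROOFS =====

def invc (c : Char) : Char := if c == '1' then '0' else '1'

theorem set_if_eq (s : List Char) (i : Nat) (c : Char) :
    (if c == '1' then s.set i '0' else s.set i '1') = s.set i (invc c) := by
  unfold invc; split <;> rfl

theorem getD_mid (P t : List Char) (x : Char) (d : Char) :
    (P ++ x :: t).getD P.length d = x := by
  simp [List.getD]

theorem set_mid (P t : List Char) (x y : Char) :
    (P ++ x :: t).set P.length y = P ++ y :: t := by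
  simp

-- main invariant: the loop on P ++ mid ++ suf with pointers spanning exactly mid
-- inverts-and-reverses mid in place.
theorem inverseLoop_eq (n : Nat) : ∀ (mid P suf : List Char) (l r : Int),
    mid.length = n → l = P.length → r + 1 = l + mid.length →
    inverseLoop (P ++ mid ++ suf) l r = P ++ (mid.map invc).reverse ++ suf := by
  induction n using Nat.strong_induction_on with
  | _ n ih =>
    intro mid P suf l r hn hl hr
    match mid, hn with
    | [], hn =>
      rw [inverseLoop]
      have : ¬ l ≤ r := by simp at hr ⊢; omega
      simp [this]
    | (a :: rest), hn =>
      rcases List.eq_nil_or_concat rest with hrest | ⟨m, b, hmb⟩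
      · subst hrest
        -- single element: l = r, set and break
        have hlr : l = r := by simp at hr; omega
        have hln : l.toNat = P.length := by omega
        rw [inverseLoop]
        have hle : l ≤ r := le_of_eq hlr
        simp only [hle, dif_pos, if_pos hlr, hln]
        rw [List.append_assoc] at *
        simp only [List.cons_append, List.nil_append]
        rw [set_if_eq, getD_mid, set_mid]
        simp [List.append_assoc]
      · rw [List.concat_eq_append] at hmb
        subst hmb
        -- at least two elements: a :: m ++ [b]
        have hlen : (a :: (m ++ [b])).length = m.length + 2 := by simp
        have hltr : l < r := by rw [hlen] at hr; omega
        have hln : l.toNat = P.length := by omega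
        have hrn : r.toNat = (P ++ invc a :: m).length := by simp; rw [hlen] at hr; omega
        rw [inverseLoop]
        simp only [le_of_lt hltr, dif_pos, if_neg (ne_of_lt hltr)]
        have hshape : P ++ (a :: (m ++ [b])) ++ suf = P ++ a :: (m ++ b :: suf) := by
          simp
        rw [hshape]
        have e1 : (P ++ a :: (m ++ b :: suf)).getD l.toNat ' ' = a := by
          rw [hln]; exact getD_mid P (m ++ b :: suf) a ' '
        rw [e1, set_if_eq (P ++ a :: (m ++ b :: suf)) l.toNat a]
        have e2 : (P ++ a :: (m ++ b :: suf)).set l.toNat (invc a)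
            = (P ++ invc a :: m) ++ b :: suf := by
          rw [hln, set_mid]; simp
        rw [e2]
        have e3 : ((P ++ invc a :: m) ++ b :: suf).getD r.toNat ' ' = b := by
          rw [hrn]; exact getD_mid _ suf b ' '
        rw [e3, set_if_eq ((P ++ invc a :: m) ++ b :: suf) r.toNat b]
        have e4 : ((P ++ invc a :: m) ++ b :: suf).set r.toNat (invc b)
            = P ++ invc a :: (m ++ invc b :: suf) := by
          rw [hrn, set_mid]; simp
        rw [e4]
        have e5 : (P ++ invc a :: (m ++ invc b :: suf)).getD l.toNat ' ' = invc a := by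
          rw [hln]; exact getD_mid P _ (invc a) ' '
        have e6 : (P ++ invc a :: (m ++ invc b :: suf)).getD r.toNat ' ' = invc b := by
          rw [show P ++ invc a :: (m ++ invc b :: suf) = (P ++ invc a :: m) ++ invc b :: suf
              from by simp, hrn]
          exact getD_mid _ suf (invc b) ' '
        rw [e5, e6]
        have e7 : (P ++ invc a :: (m ++ invc b :: suf)).set l.toNat (invc b)
            = (P ++ invc b :: m) ++ invc b :: suf := by
          rw [hln, set_mid]; simp
        rw [e7]
        have e8 : ((P ++ invc b :: m) ++ invc b :: suf).set r.toNat (invc a)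
            = (P ++ [invc b]) ++ m ++ invc a :: suf := by
          rw [show r.toNat = (P ++ invc b :: m).length from by simpa using hrn, set_mid]
          simp
        rw [e8]
        have hm : m.length < n := by omega
        rw [ih m.length hm m (P ++ [invc b]) (invc a :: suf) (l + 1) (r - 1)
          rfl (by simp; omega) (by rw [hlen] at hr; simp; omega)]
        simp [List.append_assoc]

theorem inverse_eq_alt (s : String) : inverse s = inverse_alt s := by
  unfold inverse inverse_alt
  have := inverseLoop_eq s.toList.length s.toList [] [] 0 ((s.toList.length : Int) - 1)
    rfl (by simp) (by simp)
  simp only [List.nil_append, List.append_nil] at this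
  rw [this, List.map_reverse]
  rfl

-- ===== VERDICT (by name: the statement is the Claim_ definition above) =====
theorem inverse_spec : Claim_equal_inverse := by
  intro s _
  unfold Spec_inverse
  exact inverse_eq_alt s
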